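-- pv_equiv track=rewrite | github.com/ACTOP-GmbH/Einsatzbericht_WebApp | streamlit_einsatzbericht_app_v2_excel_masterdata.py | _build_reverse_kod_map_eb_to_aufgabe
-- ===== SOURCE A (Python) =====
-- from typing import Any, Dict, List, Optional, Tuple
--
-- def _safe_str(value: Any) -> str:
--     if value is None:
--         return ""
--     return str(value)
--
-- def _build_reverse_kod_map_eb_to_aufgabe(lookups: Dict[str, Any]) -> Dict[str, str]:
--     fwd = lookups.get("kodierung_map_eb", {}) or {}
--     rev: Dict[str, str] = {}
--     collisions = set()
--     for aufgabe, eb in fwd.items():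
--         eb_s = _safe_str(eb).strip()
--         aufg_s = _safe_str(aufgabe).strip()
--         if not eb_s or not aufg_s:
--             continue
--         if eb_s in rev and rev[eb_s] != aufg_s:
--             collisions.add(eb_s)
--         else:
--             rev[eb_s] = aufg_s
--     for c in collisions:
--         rev.pop(c, None)
--     return rev
-- ===== SOURCE B (Python) =====
-- from typing import Any, Dict
--
-- def _safe_str(value: Any) -> str:
--     if value is None:
--         return ""
--     return str(value)
--
-- def _build_reverse_kod_map_eb_to_aufgabe(lookups: Dict[str, Any]) -> Dict[str, str]:
--     fwd = lookups.get("kodierung_map_eb", {}) or {}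
--     # normalize to (eb, aufgabe) pairs, dropping entries empty after stripping
--     pairs = [(_safe_str(eb).strip(), _safe_str(aufg).strip()) for aufg, eb in fwd.items()]
--     pairs = [(e, a) for (e, a) in pairs if e and a]
--     # keep a pair iff every occurrence of its eb carries the same aufgabe
--     return {e: a for (e, a) in pairs
--             if all(e2 != e or a2 == a for (e2, a2) in pairs)}
-- ===== Notes on version B (the rewrite author's own statement) =====
-- stated objective: alternative
-- what changed: Replaces A's incremental rev-dict with a collision set and a deletion pass by a declarative two-stage pipeline: normalize fwd to a stripped (eb, aufgabe) pair list, then keep a pair via a quadratic all-scan checking that every occurrence of its eb carries the same aufgabe.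
import Mathlib
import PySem

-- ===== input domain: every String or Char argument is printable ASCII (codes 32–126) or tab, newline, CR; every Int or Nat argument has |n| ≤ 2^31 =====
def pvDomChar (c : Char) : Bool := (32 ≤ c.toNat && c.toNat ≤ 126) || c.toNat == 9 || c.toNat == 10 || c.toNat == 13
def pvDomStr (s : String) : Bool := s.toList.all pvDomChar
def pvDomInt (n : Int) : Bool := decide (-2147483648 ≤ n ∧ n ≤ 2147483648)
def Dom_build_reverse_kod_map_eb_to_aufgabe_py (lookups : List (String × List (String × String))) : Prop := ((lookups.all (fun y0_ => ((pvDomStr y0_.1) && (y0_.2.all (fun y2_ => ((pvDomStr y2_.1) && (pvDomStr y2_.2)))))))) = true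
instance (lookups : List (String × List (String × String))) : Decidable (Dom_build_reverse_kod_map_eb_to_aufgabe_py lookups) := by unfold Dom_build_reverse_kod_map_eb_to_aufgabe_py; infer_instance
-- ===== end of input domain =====

-- B replaces A's incremental rev-dict + collision-set + deletion pass by a declarative
-- pipeline: a normalized pair list and a quadratic all-scan keeping a pair iff every
-- occurrence of its key carries the same value (objective: alternative, not faster).
-- Return value only; neither version mutates its argument.

-- shared line of both Pythons: `lookups.get("kodierung_map_eb", {}) or {}`
-- (`or {}` replaces a falsy (= empty) dict by {}, so it is `if · = [] then [] else ·`)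
def pvFwd (lookups : List (String × List (String × String))) : List (String × String) :=
  let fwd0 := (PySem.Dict.mk lookups).getD "kodierung_map_eb" []
  if fwd0 = [] then [] else fwd0

-- ===== PORT A =====
-- loop body of A: state = (rev, collisions); `_safe_str` is the identity on str values
def stepA (st : PySem.Dict String String × PySem.Set String) (p : String × String) :
    PySem.Dict String String × PySem.Set String :=
  let eb_s := PySem.Str.strip p.2
  let aufg_s := PySem.Str.strip p.1
  if eb_s = "" ∨ aufg_s = "" then st
  else if st.1.contains eb_s = true ∧ st.1.get? eb_s ≠ some aufg_s then (st.1, st.2.add eb_s)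
  else (st.1.insert eb_s aufg_s, st.2)

def build_reverse_kod_map_eb_to_aufgabe_py (lookups : List (String × List (String × String))) : List (String × String) :=
  let fwd := pvFwd lookups
  let st := fwd.foldl stepA (PySem.Dict.empty, PySem.Set.empty)
  -- `for c in collisions: rev.pop(c, None)`: the resulting dict does not depend on the
  -- (unmodelled) set iteration order, since each pop only touches its own key
  (st.2.foldl (fun r c => r.erase c) st.1).items

-- ===== PORT B =====
def build_reverse_kod_map_eb_to_aufgabe_py_alt (lookups : List (String × List (String × String))) : List (String × String) :=
  let fwd := pvFwd lookups
  -- `[(e, a) for ...]` over fwd.items(), stripping, then dropping empty-after-strip pairs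
  let pairs := (fwd.map (fun p => (PySem.Str.strip p.2, PySem.Str.strip p.1))).filter
      (fun q => decide (q.1 ≠ "" ∧ q.2 ≠ ""))
  -- `{e: a for (e, a) in pairs if all(e2 != e or a2 == a for (e2, a2) in pairs)}`
  let kept := pairs.filter (fun q => pairs.all (fun q2 => decide (q2.1 ≠ q.1 ∨ q2.2 = q.2)))
  (kept.foldl (fun d q => d.insert q.1 q.2) PySem.Dict.empty).items

-- ===== PRECONDITION & SPEC =====
def Spec_build_reverse_kod_map_eb_to_aufgabe_py (lookups : List (String × List (String × String))) (out : List (String × String)) : Prop := out = build_reverse_kod_map_eb_to_aufgabe_py_alt lookups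
instance (lookups : List (String × List (String × String))) (out : List (String × String)) : Decidable (Spec_build_reverse_kod_map_eb_to_aufgabe_py lookups out) := by unfold Spec_build_reverse_kod_map_eb_to_aufgabe_py; infer_instance

-- ===== CLAIM (what is proved, stated in full; the proofs are below) =====
def Claim_equal_build_reverse_kod_map_eb_to_aufgabe_py : Prop := ∀ (lookups : List (String × List (String × String))), Dom_build_reverse_kod_map_eb_to_aufgabe_py lookups → Spec_build_reverse_kod_map_eb_to_aufgabe_py lookups (build_reverse_kod_map_eb_to_aufgabe_py lookups)

-- ===== LEMMAS AND PROOFS =====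

-- ghost grouping dict (proof-only): eb_s ↦ set of distinct aufg_s values seen for it
def stepB (g : PySem.Dict String (PySem.Set String)) (p : String × String) :
    PySem.Dict String (PySem.Set String) :=
  let eb_s := PySem.Str.strip p.2
  let aufg_s := PySem.Str.strip p.1
  if eb_s ≠ "" ∧ aufg_s ≠ "" then g.modify eb_s PySem.Set.empty (fun s => s.add aufg_s) else g

-- the same grouping step on an already-normalized pair (eb_s, aufg_s)
def stepG (g : PySem.Dict String (PySem.Set String)) (q : String × String) :
    PySem.Dict String (PySem.Set String) :=
  g.modify q.1 PySem.Set.empty (fun s => s.add q.2)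

-- the normalized valid pair list both stages of B work on
def pvNorm (l : List (String × String)) : List (String × String) :=
  (l.map (fun p => (PySem.Str.strip p.2, PySem.Str.strip p.1))).filter
    (fun q => decide (q.1 ≠ "" ∧ q.2 ≠ ""))

-- key-level predicate: all occurrences of k in P carry the same value
def pvUniform (P : List (String × String)) (k : String) : Bool :=
  P.all (fun q1 => P.all (fun q2 => !(q1.1 == k) || !(q2.1 == k) || q1.2 == q2.2))

-- ===== part 1: A's output = singleton-groups view of the ghost grouping dict =====

-- the invariant relating A's loop state (rev, collisions) to the ghost groups dict
def pvInv (r : PySem.Dict String String) (c : PySem.Set String)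
    (g : PySem.Dict String (PySem.Set String)) : Prop :=
  r.keys = g.keys ∧ r.keys.Nodup ∧
  (∀ k, r.get? k = (g.getD k PySem.Set.empty).head?) ∧
  (∀ k, k ∈ c ↔ 2 ≤ (g.getD k PySem.Set.empty).length)

theorem pvInv_empty : pvInv PySem.Dict.empty PySem.Set.empty PySem.Dict.empty := by
  refine ⟨rfl, by simp [PySem.Dict.keys_empty], ?_, ?_⟩ <;> intro k <;>
    simp [PySem.Dict.get?_empty, PySem.Dict.getD_empty, PySem.Set.empty]

theorem pvInv_step (r : PySem.Dict String String) (c : PySem.Set String)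
    (g : PySem.Dict String (PySem.Set String)) (p : String × String) (h : pvInv r c g) :
    pvInv (stepA (r, c) p).1 (stepA (r, c) p).2 (stepB g p) := by
  obtain ⟨hk, hnd, hget, hcol⟩ := h
  simp only [stepA, stepB]
  set e := PySem.Str.strip p.2 with he
  set a := PySem.Str.strip p.1 with ha
  by_cases hskip : e = "" ∨ a = ""
  · have hnc : ¬ (e ≠ "" ∧ a ≠ "") := by tauto
    simp only [if_pos hskip, if_neg hnc]
    exact ⟨hk, hnd, hget, hcol⟩
  · have hcond : e ≠ "" ∧ a ≠ "" := by tauto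
    simp only [if_neg hskip, if_pos hcond, PySem.Dict.modify]
    set old := g.getD e PySem.Set.empty with hold
    have hciff : (g.contains e = true) ↔ (r.contains e = true) := by
      rw [PySem.Dict.contains_iff_mem_keys, PySem.Dict.contains_iff_mem_keys, hk]
    by_cases hc : r.contains e = true ∧ r.get? e ≠ some a
    · simp only [if_pos hc]
      obtain ⟨hcont, hneq⟩ := hc
      have hsome : (r.get? e).isSome := (PySem.Dict.contains_eq_isSome_get? r e) ▸ hcont
      obtain ⟨v, hv⟩ := Option.isSome_iff_exists.mp hsome
      have hh := hget e; rw [hv, ← hold] at hh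
      obtain ⟨t, ht⟩ : ∃ t, old = v :: t := by
        cases hO : old with
        | nil => rw [hO] at hh; simp at hh
        | cons b t => rw [hO] at hh; simp at hh; exact ⟨t, by rw [hh]⟩
      have hva : v ≠ a := fun hva => hneq (by rw [hv, hva])
      have hgcont : g.contains e = true := hciff.mpr hcont
      have hlen2 : 2 ≤ (old.add a).length := by
        rw [ht]; unfold PySem.Set.add; split
        · next hmem =>
          have hmem' : a ∈ v :: t := by simpa using hmem
          have : a ∈ t := by cases hmem' with
            | head => exact absurd rfl hva.symm
            | tail _ hmem'' => exact hmem''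
          have := List.length_pos_of_mem this
          simp only [List.length_cons]; omega
        · simp
      refine ⟨?_, hnd, ?_, ?_⟩
      · rw [PySem.Dict.keys_insert_of_contains g _ hgcont, hk]
      · intro k
        rw [PySem.Dict.getD_insert]
        by_cases hke : k = e
        · subst hke; rw [if_pos rfl, hv, ht]
          unfold PySem.Set.add; split <;> simp
        · rw [if_neg hke]; exact hget k
      · intro k
        rw [PySem.Dict.getD_insert, PySem.Set.mem_add]
        by_cases hke : k = e
        · subst hke; simp [hlen2]
        · rw [if_neg hke]
          simp only [hke, or_false]
          exact hcol k
    · simp only [if_neg hc]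
      have hc' : r.contains e = true → r.get? e = some a := by
        intro hct; by_contra hne; exact hc ⟨hct, hne⟩
      by_cases hcont : r.contains e = true
      · have hv : r.get? e = some a := hc' hcont
        have hh := hget e; rw [hv, ← hold] at hh
        obtain ⟨t, ht⟩ : ∃ t, old = a :: t := by
          cases hO : old with
          | nil => rw [hO] at hh; simp at hh
          | cons b t => rw [hO] at hh; simp at hh; exact ⟨t, by rw [hh]⟩
        have hgcont : g.contains e = true := hciff.mpr hcont
        have hadd : old.add a = old := by
          rw [ht]; unfold PySem.Set.add; rw [if_pos (by simp)]
        refine ⟨?_, PySem.Dict.nodup_keys_insert r e a hnd, ?_, ?_⟩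
        · rw [PySem.Dict.keys_insert_of_contains r _ hcont,
              PySem.Dict.keys_insert_of_contains g _ hgcont, hk]
        · intro k
          rw [PySem.Dict.get?_insert, PySem.Dict.getD_insert]
          by_cases hke : k = e
          · subst hke; rw [if_pos rfl, if_pos rfl, hadd, ht]; simp
          · rw [if_neg hke, if_neg hke]; exact hget k
        · intro k
          rw [PySem.Dict.getD_insert]
          by_cases hke : k = e
          · subst hke; rw [if_pos rfl, hadd, hold]; exact hcol e
          · rw [if_neg hke]; exact hcol k
      · have hcontf : r.contains e = false := by simpa using hcont
        have hv : r.get? e = none := by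
          have := PySem.Dict.contains_eq_isSome_get? r e
          rw [hcontf] at this
          exact Option.not_isSome_iff_eq_none.mp (by rw [← this]; simp)
        have hh := hget e; rw [hv, ← hold] at hh
        have hO : old = [] := by
          cases hO : old with
          | nil => rfl
          | cons b t => rw [hO] at hh; simp at hh
        have hgcontf : g.contains e = false := by
          cases hgc : g.contains e with
          | false => rfl
          | true => rw [hciff.mp hgc] at hcontf; simp at hcontf
        have hadd : old.add a = [a] := by rw [hO]; rfl
        refine ⟨?_, PySem.Dict.nodup_keys_insert r e a hnd, ?_, ?_⟩
        · rw [PySem.Dict.keys_insert_of_not_contains r _ hcontf,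
              PySem.Dict.keys_insert_of_not_contains g _ hgcontf, hk]
        · intro k
          rw [PySem.Dict.get?_insert, PySem.Dict.getD_insert]
          by_cases hke : k = e
          · subst hke; rw [if_pos rfl, if_pos rfl, hadd]; simp
          · rw [if_neg hke, if_neg hke]; exact hget k
        · intro k
          rw [PySem.Dict.getD_insert]
          by_cases hke : k = e
          · subst hke; rw [if_pos rfl, hadd]
            have := hcol e; rw [← hold, hO] at this
            simp at this ⊢
            omega
          · rw [if_neg hke]; exact hcol k

theorem pvInv_foldl (l : List (String × String)) :
    ∀ r c g, pvInv r c g →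
      pvInv (l.foldl stepA (r, c)).1 (l.foldl stepA (r, c)).2 (l.foldl stepB g) := by
  induction l with
  | nil => intro r c g h; exact h
  | cons p l ih =>
    intro r c g h
    have h' := pvInv_step r c g p h
    simpa using ih (stepA (r, c) p).1 (stepA (r, c) p).2 (stepB g p) h'

theorem erase_foldl_items (c : List String) :
    ∀ r : PySem.Dict String String,
      (c.foldl (fun r k => r.erase k) r).items
        = r.items.filter (fun p => ¬ p.1 ∈ c) := by
  induction c with
  | nil => intro r; simp
  | cons k c ih =>
    intro r
    rw [List.foldl_cons, ih]
    simp only [PySem.Dict.erase, List.filter_filter]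
    apply List.filter_congr
    intro p _
    by_cases h : p.1 = k <;> simp [h, List.mem_cons, Bool.and_comm]

theorem pvInv_final (r : PySem.Dict String String) (c : PySem.Set String)
    (g : PySem.Dict String (PySem.Set String)) (h : pvInv r c g) :
    (c.foldl (fun r k => r.erase k) r).items
      = (g.items.filter (fun p => p.2.length = 1)).map (fun p => (p.1, p.2.headD "")) := by
  obtain ⟨hk, hnd, hget, hcol⟩ := h
  have hndg : g.keys.Nodup := hk ▸ hnd
  rw [erase_foldl_items]
  rw [PySem.Dict.items_eq_map_keys r hnd "", PySem.Dict.items_eq_map_keys g hndg PySem.Set.empty]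
  rw [List.filter_map, List.filter_map, List.map_map, ← hk]
  have hfilt : ∀ k ∈ r.keys,
      ((fun p : String × String => decide (¬ p.1 ∈ c)) ∘ fun k => (k, r.getD k ""))  k
      = ((fun p : String × PySem.Set String => decide (p.2.length = 1)) ∘ fun k => (k, g.getD k PySem.Set.empty)) k := by
    intro k hkmem
    have hne : r.get? k ≠ none := by
      intro hno; rw [PySem.Dict.get?_eq_none_iff_not_mem_keys] at hno; exact hno hkmem
    obtain ⟨v, hv⟩ := Option.ne_none_iff_exists'.mp hne
    have hh := hget k; rw [hv] at hh
    have hlen : 1 ≤ (g.getD k PySem.Set.empty).length := by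
      cases hg : g.getD k PySem.Set.empty with
      | nil => rw [hg] at hh; simp at hh
      | cons a t => simp
    simp only [Function.comp, decide_eq_decide]
    rw [hcol k]
    omega
  rw [List.filter_congr hfilt]
  apply List.map_congr_left
  intro k hkmem
  have hkmem' : k ∈ r.keys := List.mem_of_mem_filter hkmem
  have hne : r.get? k ≠ none := by
    intro hno; rw [PySem.Dict.get?_eq_none_iff_not_mem_keys] at hno; exact hno hkmem'
  obtain ⟨v, hv⟩ := Option.ne_none_iff_exists'.mp hne
  have hh := hget k; rw [hv] at hh
  simp only [Function.comp]
  rw [Prod.mk.injEq]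
  refine ⟨rfl, ?_⟩
  rw [PySem.Dict.getD_eq_get?_getD, hv]
  cases hg : g.getD k PySem.Set.empty with
  | nil => rw [hg] at hh; simp at hh
  | cons a t => rw [hg] at hh; simp at hh; simp [hh]

-- ===== part 2: the ghost grouping dict over fwd = grouping over the normalized pairs =====

theorem foldB_eq_foldG (l : List (String × String)) :
    ∀ g, l.foldl stepB g = (pvNorm l).foldl stepG g := by
  induction l with
  | nil => intro g; rfl
  | cons p l ih =>
    intro g
    by_cases hc : PySem.Str.strip p.2 ≠ "" ∧ PySem.Str.strip p.1 ≠ ""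
    · have h1 : stepB g p = stepG g (PySem.Str.strip p.2, PySem.Str.strip p.1) := by
        simp [stepB, stepG, hc]
      have h2 : pvNorm (p :: l)
          = (PySem.Str.strip p.2, PySem.Str.strip p.1) :: pvNorm l := by
        simp [pvNorm, hc]
      rw [List.foldl_cons, h1, h2, List.foldl_cons, ih]
    · have h1 : stepB g p = g := by simp [stepB, hc]
      have h2 : pvNorm (p :: l) = pvNorm l := by simp [pvNorm, hc]
      rw [List.foldl_cons, h1, h2, ih]

-- ===== part 3: singleton-groups view = B's quadratic filter + dict comprehension =====

theorem pvUniform_iff (P : List (String × String)) (k : String) :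
    pvUniform P k = true ↔ ∀ a b, (k, a) ∈ P → (k, b) ∈ P → a = b := by
  unfold pvUniform
  constructor
  · intro h a b ha hb
    rw [List.all_eq_true] at h
    have h1 := h (k, a) ha
    rw [List.all_eq_true] at h1
    have h2 := h1 (k, b) hb
    simpa using h2
  · intro h
    rw [List.all_eq_true]
    intro q1 h1
    rw [List.all_eq_true]
    intro q2 h2
    by_cases hk1 : q1.1 = k
    · by_cases hk2 : q2.1 = k
      · have heq : q1.2 = q2.2 :=
          h q1.2 q2.2 (by rw [← hk1]; exact h1) (by rw [← hk2]; exact h2)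
        simp [heq]
      · simp [hk2]
    · simp [hk1]

-- B's kept-filter agrees with pvUniform on members of the pair list
theorem keep_eq_uniform (P : List (String × String)) (q : String × String) (hq : q ∈ P) :
    (P.all (fun q2 => decide (q2.1 ≠ q.1 ∨ q2.2 = q.2))) = pvUniform P q.1 := by
  rw [Bool.eq_iff_iff, pvUniform_iff]
  simp only [List.all_eq_true, decide_eq_true_eq]
  constructor
  · intro h a b ha hb
    have hxa := h _ ha
    have hya := h _ hb
    simp only [ne_eq, not_true_eq_false, false_or] at hxa hya
    rw [hxa, hya]
  · intro h q2 hq2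
    by_cases hk : q2.1 = q.1
    · right
      exact h q2.2 q.2 (by rw [← hk]; exact hq2) (by rw [(rfl : q = (q.1, q.2))] at hq ⊢; exact hq)
    · left; exact hk

-- every value occurring with key k in l ends up in the group of k
theorem mem_group_foldG (l : List (String × String)) :
    ∀ g k v, ((k, v) ∈ l ∨ v ∈ g.getD k PySem.Set.empty) →
      v ∈ (l.foldl stepG g).getD k PySem.Set.empty := by
  induction l with
  | nil => intro g k v h; exact h.resolve_left (by simp)
  | cons q l ih =>
    intro g k v h
    rw [List.foldl_cons]
    apply ih
    rcases h with h | h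
    · rcases List.mem_cons.mp h with h | h
      · right
        obtain ⟨qk, qv⟩ := q
        injection h with h1 h2
        subst h1; subst h2
        have := PySem.Dict.getD_modify g k k PySem.Set.empty (fun s => s.add v)
        rw [if_pos rfl] at this
        show v ∈ (PySem.Dict.modify g k PySem.Set.empty fun s => s.add v).getD k PySem.Set.empty
        rw [this, PySem.Set.mem_add]
        right; rfl
      · left; exact h
    · right
      have := PySem.Dict.getD_modify g q.1 k PySem.Set.empty (fun s => s.add q.2)
      show v ∈ (PySem.Dict.modify g q.1 PySem.Set.empty fun s => s.add q.2).getD k PySem.Set.empty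
      rw [this]
      by_cases hk : k = q.1
      · rw [if_pos hk, PySem.Set.mem_add]
        left; rw [← hk]; exact h
      · rw [if_neg hk]; exact h

-- invariant relating the ghost grouping fold to B's dict-comprehension fold
def pvInv2 (P : List (String × String)) (g : PySem.Dict String (PySem.Set String))
    (d : PySem.Dict String String) : Prop :=
  g.keys.Nodup ∧
  d.keys = g.keys.filter (pvUniform P) ∧
  (∀ k, pvUniform P k = true → d.get? k = (g.getD k PySem.Set.empty).head?) ∧
  (∀ k v, v ∈ g.getD k PySem.Set.empty → (k, v) ∈ P) ∧
  (∀ k, k ∈ g.keys ↔ g.getD k PySem.Set.empty ≠ []) ∧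
  (∀ k, (g.getD k PySem.Set.empty).Nodup)

theorem pvInv2_empty (P : List (String × String)) :
    pvInv2 P PySem.Dict.empty PySem.Dict.empty := by
  refine ⟨by simp [PySem.Dict.keys_empty], by simp [PySem.Dict.keys_empty], ?_, ?_, ?_, ?_⟩ <;>
    intro k <;>
    simp [PySem.Dict.get?_empty, PySem.Dict.getD_empty, PySem.Set.empty, PySem.Dict.keys_empty]

theorem pvInv2_step (P : List (String × String)) (q : String × String) (hq : q ∈ P)
    (g : PySem.Dict String (PySem.Set String)) (d : PySem.Dict String String)
    (h : pvInv2 P g d) :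
    pvInv2 P (stepG g q) (if pvUniform P q.1 then d.insert q.1 q.2 else d) := by
  obtain ⟨k, a⟩ := q
  obtain ⟨hnd, hkeys, hget, hmemP, hne, hnds⟩ := h
  simp only at *
  set s := g.getD k PySem.Set.empty with hs
  have hgetD' : ∀ k', (stepG g (k, a)).getD k' PySem.Set.empty
      = if k' = k then s.add a else g.getD k' PySem.Set.empty :=
    fun k' => PySem.Dict.getD_modify g k k' PySem.Set.empty (fun s => s.add a)
  have hkeysG : (stepG g (k, a)).keys
      = if g.contains k then g.keys else g.keys ++ [k] := by
    rw [stepG, PySem.Dict.keys_modify]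
    by_cases hc : g.contains k = true
    · rw [if_pos hc, PySem.Dict.keys_insert_of_contains g _ hc]
    · have hc' : g.contains k = false := by simpa using hc
      rw [if_neg (by simp [hc']), PySem.Dict.keys_insert_of_not_contains g _ hc']
  have hadd_ne : s.add a ≠ [] := by
    simp only [PySem.Set.add]
    split
    · next hmem =>
      intro hnil
      rw [hnil] at hmem
      simp at hmem
    · simp
  have hvals : ∀ v ∈ s, (k, v) ∈ P := fun v hv => hmemP k v hv
  refine ⟨?_, ?_, ?_, ?_, ?_, ?_⟩
  · -- keys of g' are Nodup
    rw [hkeysG]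
    by_cases hc : g.contains k = true
    · rw [if_pos hc]; exact hnd
    · have hc' : g.contains k = false := by simpa using hc
      rw [if_neg (by simp [hc'])]
      have hkn : k ∉ g.keys := fun hm => by
        rw [← PySem.Dict.contains_iff_mem_keys] at hm; rw [hm] at hc'; simp at hc'
      rw [List.nodup_append]
      refine ⟨hnd, List.nodup_singleton k, ?_⟩
      intro x hx y hy
      have hyk : y = k := by simpa using hy
      subst hyk
      intro hxy
      exact hkn (hxy ▸ hx)
  · -- d'.keys = g'.keys.filter uniform
    rw [hkeysG]
    by_cases hu : pvUniform P k = true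
    · rw [if_pos hu]
      by_cases hc : g.contains k = true
      · rw [if_pos hc]
        have hkm : k ∈ d.keys := by
          rw [hkeys, List.mem_filter]
          exact ⟨(PySem.Dict.contains_iff_mem_keys g k).mp hc, hu⟩
        have hdc : d.contains k = true := (PySem.Dict.contains_iff_mem_keys d k).mpr hkm
        rw [PySem.Dict.keys_insert_of_contains d _ hdc, hkeys]
      · have hc' : g.contains k = false := by simpa using hc
        rw [if_neg (by simp [hc'])]
        have hkn : k ∉ g.keys := fun hm => by
          rw [← PySem.Dict.contains_iff_mem_keys] at hm; rw [hm] at hc'; simp at hc'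
        have hdn : d.contains k = false := by
          cases hdc : d.contains k with
          | false => rfl
          | true =>
            have := (PySem.Dict.contains_iff_mem_keys d k).mp hdc
            rw [hkeys, List.mem_filter] at this
            exact absurd this.1 hkn
        rw [PySem.Dict.keys_insert_of_not_contains d _ hdn, hkeys, List.filter_append]
        simp [hu]
    · rw [if_neg hu]
      by_cases hc : g.contains k = true
      · rw [if_pos hc]; exact hkeys
      · have hc' : g.contains k = false := by simpa using hc
        rw [if_neg (by simp [hc']), hkeys, List.filter_append]
        have : pvUniform P k = false := by simpa using hu
        simp [this]
  · -- get? on uniform keys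
    intro k' hu'
    rw [hgetD']
    by_cases hk' : k' = k
    · subst hk'
      rw [if_pos rfl, if_pos hu', PySem.Dict.get?_insert, if_pos rfl]
      have hall : ∀ v ∈ s, v = a := by
        intro v hv
        exact (pvUniform_iff P k').mp hu' v a (hvals v hv) hq
      cases hsl : s with
      | nil => rfl
      | cons x t =>
        have hx : x = a := hall x (by rw [hsl]; exact List.mem_cons_self ..)
        have hmem : a ∈ s := by rw [hsl, ← hx]; exact List.mem_cons_self ..
        have hadd : s.add a = s := by
          simp only [PySem.Set.add]
          rw [if_pos (by simpa using hmem)]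
        rw [← hsl, hadd, hsl, hx]
        rfl
    · rw [if_neg hk']
      by_cases hu : pvUniform P k = true
      · rw [if_pos hu, PySem.Dict.get?_insert, if_neg hk']
        exact hget k' hu'
      · rw [if_neg hu]
        exact hget k' hu'
  · -- group members come from P
    intro k' v hv
    rw [hgetD'] at hv
    by_cases hk' : k' = k
    · subst hk'
      rw [if_pos rfl, PySem.Set.mem_add] at hv
      rcases hv with hv | hv
      · exact hvals v hv
      · rw [hv]; exact hq
    · rw [if_neg hk'] at hv
      exact hmemP k' v hv
  · -- key membership ↔ nonempty group
    intro k'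
    rw [hgetD', hkeysG]
    by_cases hk' : k' = k
    · subst hk'
      rw [if_pos rfl]
      constructor
      · intro _; exact hadd_ne
      · intro _
        by_cases hc : g.contains k' = true
        · rw [if_pos hc]; exact (PySem.Dict.contains_iff_mem_keys g k').mp hc
        · have hc' : g.contains k' = false := by simpa using hc
          rw [if_neg (by simp [hc'])]
          simp
    · rw [if_neg hk']
      by_cases hc : g.contains k = true
      · rw [if_pos hc]; exact hne k'
      · have hc' : g.contains k = false := by simpa using hc
        rw [if_neg (by simp [hc'])]
        rw [List.mem_append]
        simp only [List.mem_singleton, hk', or_false]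
        exact hne k'
  · -- groups stay Nodup
    intro k'
    rw [hgetD']
    by_cases hk' : k' = k
    · subst hk'
      rw [if_pos rfl]
      simp only [PySem.Set.add]
      split
      · exact hnds k'
      · next hmem =>
        have hnm : a ∉ s := by simpa using hmem
        rw [List.nodup_append]
        refine ⟨hnds k', List.nodup_singleton a, ?_⟩
        intro y hy z hz
        have hza : z = a := by simpa using hz
        subst hza
        intro hyz
        exact hnm (hyz ▸ hy)
    · rw [if_neg hk']; exact hnds k'

theorem pvInv2_foldl (P : List (String × String)) (l : List (String × String))
    (hl : ∀ q ∈ l, q ∈ P) :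
    ∀ g d, pvInv2 P g d →
      pvInv2 P (l.foldl stepG g)
        ((l.filter (fun q => pvUniform P q.1)).foldl (fun d q => d.insert q.1 q.2) d) := by
  induction l with
  | nil => intro g d h; exact h
  | cons q l ih =>
    intro g d h
    have hq : q ∈ P := hl q (List.mem_cons_self ..)
    have hl' : ∀ p ∈ l, p ∈ P := fun p hp => hl p (List.mem_cons_of_mem q hp)
    have hstep := pvInv2_step P q hq g d h
    rw [List.foldl_cons, List.filter_cons]
    by_cases hu : pvUniform P q.1 = true
    · rw [if_pos hu]
      rw [List.foldl_cons]
      have := ih hl' (stepG g q) (d.insert q.1 q.2) (by rwa [if_pos hu] at hstep)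
      exact this
    · have hu' : pvUniform P q.1 = false := by simpa using hu
      rw [hu']
      simp only [Bool.false_eq_true, if_false]
      exact ih hl' (stepG g q) d (by rwa [if_neg (by simp [hu']) ] at hstep)

theorem pvInv2_final (P : List (String × String))
    (g : PySem.Dict String (PySem.Set String)) (d : PySem.Dict String String)
    (hG : g = P.foldl stepG PySem.Dict.empty) (h : pvInv2 P g d) :
    (g.items.filter (fun p => p.2.length = 1)).map (fun p => (p.1, p.2.headD ""))
      = d.items := by
  obtain ⟨hnd, hkeys, hget, hmemP, hne, hnds⟩ := h
  have hndd : d.keys.Nodup := by rw [hkeys]; exact hnd.filter _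
  rw [PySem.Dict.items_eq_map_keys g hnd PySem.Set.empty,
      PySem.Dict.items_eq_map_keys d hndd ""]
  rw [List.filter_map, List.map_map]
  have hflt : ∀ k ∈ g.keys,
      ((fun p : String × PySem.Set String => decide (p.2.length = 1)) ∘
        fun k => (k, g.getD k PySem.Set.empty)) k = pvUniform P k := by
    intro k hkm
    simp only [Function.comp]
    rw [Bool.eq_iff_iff, decide_eq_true_eq, pvUniform_iff]
    constructor
    · intro h1 x y hx hy
      obtain ⟨v, hv⟩ := List.length_eq_one_iff.mp h1
      have hxm : x ∈ g.getD k PySem.Set.empty := by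
        rw [hG]; exact mem_group_foldG P _ k x (Or.inl hx)
      have hym : y ∈ g.getD k PySem.Set.empty := by
        rw [hG]; exact mem_group_foldG P _ k y (Or.inl hy)
      rw [hv] at hxm hym
      simp at hxm hym
      rw [hxm, hym]
    · intro huni
      have hnonempty := (hne k).mp hkm
      cases hsl : g.getD k PySem.Set.empty with
      | nil => exact absurd hsl hnonempty
      | cons x t =>
        cases ht : t with
        | nil => simp
        | cons y t' =>
          exfalso
          have hnodup := hnds k
          rw [hsl, ht] at hnodup
          have hxP : (k, x) ∈ P := hmemP k x (by rw [hsl]; exact List.mem_cons_self ..)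
          have hyP : (k, y) ∈ P := hmemP k y (by
            rw [hsl, ht]
            exact List.mem_cons_of_mem x (List.mem_cons_self ..))
          have hxy : x = y := huni x y hxP hyP
          have : x ∉ y :: t' := (List.nodup_cons.mp hnodup).1
          exact this (by rw [hxy]; exact List.mem_cons_self ..)
  rw [List.filter_congr hflt, ← hkeys]
  apply List.map_congr_left
  intro k hkm
  have hkm' : k ∈ g.keys.filter (pvUniform P) := by rwa [hkeys] at hkm
  have hu : pvUniform P k = true := (List.mem_filter.mp hkm').2
  simp only [Function.comp]
  rw [Prod.mk.injEq]
  refine ⟨rfl, ?_⟩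
  have hdg : d.getD k "" = (List.head? (g.getD k PySem.Set.empty)).getD "" := by
    rw [PySem.Dict.getD_eq_get?_getD d k "", hget k hu]
  rw [hdg]
  generalize g.getD k PySem.Set.empty = L
  cases L <;> simp

-- ===== VERDICT (by name: the statement is the Claim_ definition above) =====
theorem build_reverse_kod_map_eb_to_aufgabe_py_spec : Claim_equal_build_reverse_kod_map_eb_to_aufgabe_py := by
  intro lookups _
  unfold Spec_build_reverse_kod_map_eb_to_aufgabe_py
  simp only [build_reverse_kod_map_eb_to_aufgabe_py, build_reverse_kod_map_eb_to_aufgabe_py_alt]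
  have hA := pvInv_final _ _ _ (pvInv_foldl (pvFwd lookups) _ _ _ pvInv_empty)
  rw [hA, foldB_eq_foldG (pvFwd lookups) PySem.Dict.empty]
  have hnorm : ((pvFwd lookups).map (fun p => (PySem.Str.strip p.2, PySem.Str.strip p.1))).filter
      (fun q => decide (q.1 ≠ "" ∧ q.2 ≠ "")) = pvNorm (pvFwd lookups) := rfl
  rw [hnorm]
  rw [List.filter_congr (fun q hq => keep_eq_uniform (pvNorm (pvFwd lookups)) q hq)]
  exact pvInv2_final (pvNorm (pvFwd lookups)) _ _ rfl
    (pvInv2_foldl (pvNorm (pvFwd lookups)) (pvNorm (pvFwd lookups)) (fun q hq => hq) _ _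
      (pvInv2_empty (pvNorm (pvFwd lookups))))
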